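-- pv_equiv track=rewrite | github.com/TimKam/pm4py-core | pm4py/algo/discovery/dfg/variants/timelinelogprocessing.py | createDFallnext
-- ===== SOURCE A (Python) =====
-- def createDFallnext(timedict: dict):
--     '''Returns a dictionary with the activities that follow one activity in timeline dictionary.
--     Warning! Dictionary must be sorter according to time/occurency.
--     '''
--     activity_list = list(timedict.keys())
--     timeline_relations = {}
--     for i in range(0, len(activity_list)):
--         if i+1 < len(activity_list):
--             timeline_relations[activity_list[i]] = set(activity_list[i+1:len(activity_list)])
--         else:
--             timeline_relations[activity_list[i]] = {'final'}
--     return timeline_relations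
-- ===== SOURCE B (Python) =====
-- def createDFallnext(timedict: dict):
--     '''Returns a dictionary with the activities that follow one activity in timeline dictionary.'''
--     acts = list(timedict)
--     vals = []
--     suffix = []
--     for a in reversed(acts):
--         vals.append({'final'} if not suffix else set(suffix))
--         suffix = [a] + suffix
--     vals.reverse()
--     return dict(zip(acts, vals))
-- ===== Notes on version B (the rewrite author's own statement) =====
-- stated objective: alternative
-- what changed: Replaces the forward index loop that re-slices activity_list[i+1:] for every position with a single right-to-left pass that grows the suffix incrementally and zips the collected follower sets back onto the keys.
import Mathlib
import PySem

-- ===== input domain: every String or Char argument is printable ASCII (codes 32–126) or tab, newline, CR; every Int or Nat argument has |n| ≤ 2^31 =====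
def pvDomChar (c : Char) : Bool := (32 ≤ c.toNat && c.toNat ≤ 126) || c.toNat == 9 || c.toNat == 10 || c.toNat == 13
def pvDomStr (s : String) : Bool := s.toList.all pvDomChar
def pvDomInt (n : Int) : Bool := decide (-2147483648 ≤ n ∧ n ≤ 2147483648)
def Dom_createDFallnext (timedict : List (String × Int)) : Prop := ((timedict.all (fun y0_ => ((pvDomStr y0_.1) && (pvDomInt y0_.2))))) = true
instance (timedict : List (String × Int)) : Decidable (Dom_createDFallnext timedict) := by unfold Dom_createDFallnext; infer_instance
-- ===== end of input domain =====

-- B replaces A's forward index loop that re-slices activity_list[i+1:] at every position by a single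
-- right-to-left pass growing the suffix incrementally, then zips the follower sets back onto the keys
-- (objective: alternative decomposition, same cost).


-- ===== PORT A =====
def createDFallnext (timedict : List (String × Int)) : List (String × List String) :=
  let activity_list := (PySem.Dict.ofList timedict).keys
  let timeline_relations : PySem.Dict String (List String) :=
    (PySem.List.pyRange 0 (activity_list.length : Int)).foldl
      (fun d i =>
        if i + 1 < (activity_list.length : Int) then
          d.insert (PySem.List.pyGetD activity_list i "")
            (PySem.Set.ofList (PySem.List.slice activity_list (some (i + 1)) (some (activity_list.length : Int))))
        else
          d.insert (PySem.List.pyGetD activity_list i "") ["final"])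
      PySem.Dict.empty
  timeline_relations.items

-- ===== PORT B =====
def createDFallnext_alt (timedict : List (String × Int)) : List (String × List String) :=
  let acts := (PySem.Dict.ofList timedict).keys
  let p :=
    acts.reverse.foldl
      (fun (p : List (List String) × List String) a =>
        (p.1 ++ [if p.2 = [] then ["final"] else PySem.Set.ofList p.2], a :: p.2))
      ([], [])
  (PySem.Dict.ofList (acts.zip p.1.reverse)).items

-- ===== PRECONDITION & SPEC =====
def Spec_createDFallnext (timedict : List (String × Int)) (out : List (String × List String)) : Prop := out = createDFallnext_alt timedict
instance (timedict : List (String × Int)) (out : List (String × List String)) : Decidable (Spec_createDFallnext timedict out) := by unfold Spec_createDFallnext; infer_instance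

-- ===== CLAIM (what is proved, stated in full; the proofs are below) =====
def Claim_equal_createDFallnext : Prop := ∀ (timedict : List (String × Int)), Dom_createDFallnext timedict → Spec_createDFallnext timedict (createDFallnext timedict)

-- ===== LEMMAS AND PROOFS =====

-- B's loop: the collected values are, position by position, the reversed prefixes of the traversed list.
lemma pvFoldB (R : List String) (vs : List (List String)) (s : List String) :
    R.foldl
      (fun (p : List (List String) × List String) a =>
        (p.1 ++ [if p.2 = [] then ["final"] else PySem.Set.ofList p.2], a :: p.2))
      (vs, s)
    = (vs ++ (List.range R.length).map
         (fun j => if (R.take j).reverse ++ s = [] then ["final"]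
                   else PySem.Set.ofList ((R.take j).reverse ++ s)),
       R.reverse ++ s) := by
  induction R generalizing vs s with
  | nil => simp
  | cons a R ih =>
    simp only [List.foldl_cons, ih, List.length_cons, List.range_succ_eq_map, List.map_cons,
      List.take_zero, List.reverse_nil, List.nil_append, List.map_map, List.reverse_cons,
      List.append_assoc, List.cons_append, Function.comp_def, Prod.mk.injEq]
    refine ⟨?_, trivial⟩
    congr 2
    apply List.map_congr_left
    intro j _
    simp [List.take_succ_cons, List.append_assoc]

lemma pvA_items (timedict : List (String × Int)) :
    createDFallnext timedict
      = (PySem.List.pyRange 0 (((PySem.Dict.ofList timedict).keys.length : Int))).map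
          (fun i =>
            (PySem.List.pyGetD (PySem.Dict.ofList timedict).keys i "",
             if i + 1 < (((PySem.Dict.ofList timedict).keys.length : Int)) then
               PySem.Set.ofList (PySem.List.slice (PySem.Dict.ofList timedict).keys (some (i + 1))
                 (some (((PySem.Dict.ofList timedict).keys.length : Int))))
             else ["final"])) := by
  unfold createDFallnext
  set L := (PySem.Dict.ofList timedict).keys with hL
  have hstep :
      (fun (d : PySem.Dict String (List String)) (i : Int) =>
        if i + 1 < ((L.length : Int)) then
          d.insert (PySem.List.pyGetD L i "")
            (PySem.Set.ofList (PySem.List.slice L (some (i + 1)) (some ((L.length : Int)))))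
        else
          d.insert (PySem.List.pyGetD L i "") ["final"])
      = fun d i =>
        d.insert (PySem.List.pyGetD L i "")
          (if i + 1 < ((L.length : Int)) then
            PySem.Set.ofList (PySem.List.slice L (some (i + 1)) (some ((L.length : Int))))
           else ["final"]) := by
    funext d i; split <;> rfl
  simp only [hstep]
  rw [PySem.Dict.items_foldl_insert_fresh]
  · rfl
  · intro a _; exact PySem.Dict.contains_empty _
  · have : (PySem.List.pyRange 0 ((L.length : Int))).map (fun i => PySem.List.pyGetD L i "") = L :=
      PySem.List.map_pyGetD_pyRange_zero L ""
    rw [this]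
    exact hL ▸ PySem.Dict.nodup_keys_ofList timedict

lemma pvB_items (timedict : List (String × Int)) (pairs : List (String × List String))
    (hfst : pairs.map Prod.fst = (PySem.Dict.ofList timedict).keys) :
    (PySem.Dict.ofList pairs).items = pairs := by
  show (List.foldl (fun d (p : String × List String) => d.insert p.1 p.2) PySem.Dict.empty pairs).items = pairs
  rw [PySem.Dict.items_foldl_insert_fresh pairs Prod.fst Prod.snd PySem.Dict.empty]
  · simp [show PySem.Dict.empty.items = ([] : List (String × List String)) from rfl]
  · intro a _; exact PySem.Dict.contains_empty _
  · rw [hfst]; exact PySem.Dict.nodup_keys_ofList timedict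

-- ===== VERDICT (by name: the statement is the Claim_ definition above) =====
theorem createDFallnext_spec : Claim_equal_createDFallnext := by
  intro timedict _
  unfold Spec_createDFallnext
  set L := (PySem.Dict.ofList timedict).keys with hL
  rw [show createDFallnext_alt timedict
      = (PySem.Dict.ofList (L.zip ((L.reverse.foldl
          (fun (p : List (List String) × List String) a =>
            (p.1 ++ [if p.2 = [] then ["final"] else PySem.Set.ofList p.2], a :: p.2))
          ([], [])).1.reverse))).items from rfl]
  rw [pvA_items, pvFoldB]
  simp only [List.nil_append, List.append_nil, List.length_reverse]
  rw [PySem.List.pyRange_zero_natCast, List.map_map, pvB_items timedict _ (by exact List.map_fst_zip (by simp))]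
  -- the follower set stored at position i by B's loop
  have hval : ∀ i, i < L.length →
      (if L.drop (L.length - (L.length - 1 - i)) = [] then (["final"] : List String)
       else PySem.Set.ofList (L.drop (L.length - (L.length - 1 - i))))
      = (if ((i : Int)) + 1 < ((L.length : Int)) then
          PySem.Set.ofList (PySem.List.slice L (some ((i : Int) + 1)) (some ((L.length : Int))))
         else ["final"]) := by
    intro i hin
    have hidx : L.length - (L.length - 1 - i) = i + 1 := by omega
    rw [hidx]
    by_cases hc : i + 1 < L.length
    · rw [if_neg (by rw [List.drop_eq_nil_iff]; omega),
        if_pos (by exact_mod_cast hc)]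
      have hcast : ((i : Int) + 1) = (((i + 1 : Nat) : Int)) := by push_cast; ring
      rw [hcast, PySem.List.slice_natCast, List.take_of_length_le (by simp)]
    · rw [if_pos (by rw [List.drop_eq_nil_iff]; omega),
        if_neg (by exact_mod_cast hc)]
  apply List.ext_getElem
  · rw [← hL]; simp
  · intro i hi1 hi2
    have hin : i < L.length := by simpa using hi1
    simp only [Function.comp_def, List.getElem_map, List.getElem_range, List.getElem_zip,
      List.getElem_reverse, List.length_map, List.length_range, Prod.mk.injEq]
    constructor
    · rw [PySem.List.pyGetD_natCast]
      exact List.getD_eq_getElem L "" hin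
    · rw [List.take_reverse, List.reverse_reverse, ← hL]
      exact (hval i hin).symm
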